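-- pv_equiv track=rewrite | github.com/ideabosque/MobiiApp | provider/dataservice/simba/test2.py | getRelevantGroupBy_Edges
-- ===== SOURCE A (Python) =====
-- import copy
--
-- def getRelevantGroupBy_Edges(edges,povitDimEdges):
--     groupBy_EdgesAll = []
--     for selection in range(1, len(edges)):
--         enum = comb(edges, selection)
--         for i in enum:
--             groupBy_EdgesAll.append(sorted(i))
--     if 0 not in povitDimEdges.values():
--         groupBy_EdgesAll.append([])
--     groupBy_EdgesAll.append(sorted(edges))
--     groupBy_EdgesRelevants = copy.copy(groupBy_EdgesAll)
--     for key in povitDimEdges: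
--         if povitDimEdges[key] == 0:
--             for groupBy_EdgesOne in groupBy_EdgesAll:
--                 if key not in groupBy_EdgesOne and groupBy_EdgesOne in groupBy_EdgesRelevants:
--                     groupBy_EdgesRelevants.remove(groupBy_EdgesOne)
--     return groupBy_EdgesRelevants
--
-- def comb(items, n=None):
--     if n is None:
--         n = len(items)
--     for i in range(len(items)):
--         v = items[i:i+1]
--         if n == 1:
--             yield v
--         else:
--             rest = items[i+1:]
--             for c in comb(rest, n-1):
--                 yield v + c
-- ===== SOURCE B (Python) =====
-- def getRelevantGroupBy_Edges(edges, povitDimEdges):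
--     req = {k for k, v in povitDimEdges.items() if v == 0}
--     n = len(edges)
--
--     def choose(items, k):
--         if k == 0:
--             return [[]]
--         if len(items) < k:
--             return []
--         head, rest = items[0], items[1:]
--         return [[head] + c for c in choose(rest, k - 1)] + choose(rest, k)
--
--     groupBys = [sorted(c) for k in range(1, n) for c in choose(edges, k)]
--     if not req:
--         groupBys.append([])
--     groupBys.append(sorted(edges))
--     return [g for g in groupBys if req.issubset(g)]
-- ===== Notes on version B (the rewrite author's own statement) =====
-- stated objective: faster
-- what changed: B precomputes the set of zero-valued keys once and keeps each candidate grouping with a single subset test, instead of A's per-key elimination passes that rescan the whole candidate list with 'in' and list.remove; the combination generator is restructured from index-slicing to a cons-recursive chooser.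
import Mathlib
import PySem

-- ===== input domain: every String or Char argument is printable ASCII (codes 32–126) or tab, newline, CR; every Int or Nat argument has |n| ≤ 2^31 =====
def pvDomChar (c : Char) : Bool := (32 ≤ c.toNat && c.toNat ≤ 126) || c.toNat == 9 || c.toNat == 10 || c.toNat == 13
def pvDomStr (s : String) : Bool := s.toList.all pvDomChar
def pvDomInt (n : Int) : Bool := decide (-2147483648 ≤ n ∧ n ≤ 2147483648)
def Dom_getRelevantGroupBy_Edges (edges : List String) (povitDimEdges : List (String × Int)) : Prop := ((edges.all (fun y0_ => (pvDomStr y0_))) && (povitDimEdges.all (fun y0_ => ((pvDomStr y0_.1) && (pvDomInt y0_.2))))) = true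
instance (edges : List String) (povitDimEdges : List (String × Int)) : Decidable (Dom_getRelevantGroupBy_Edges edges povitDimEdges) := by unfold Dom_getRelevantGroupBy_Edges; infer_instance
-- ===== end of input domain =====

-- B replaces A's per-key elimination passes (list.remove with repeated membership scans) by one
-- filter against the precomputed set of zero-valued keys, and A's slicing generator comb by a
-- cons-structured chooser; same return value, proved below.

-- ===== PORT A =====
-- A's generator comb(items, n): for i in range(len(items)): v = items[i:i+1]; yield v, or v + c
-- for c in comb(items[i+1:], n-1)
def pvCombA (items : List String) (n : Int) : List (List String) :=
  (PySem.List.pyRange 0 (items.length : Int) 1).attach.flatMap (fun ⟨i, hi⟩ =>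
    let v := PySem.List.slice items (some i) (some (i + 1))
    if n == 1 then [v]
    else (pvCombA (PySem.List.slice items (some (i + 1)) none) (n - 1)).map (fun c => v ++ c))
termination_by items.length
decreasing_by
  have h := (PySem.List.mem_pyRange_one).mp hi
  have h2 : PySem.List.slice items (some (i + 1)) none = items.drop (i + 1).toNat :=
    PySem.List.slice_from items (by omega)
  rw [h2]
  simp only [List.length_drop]
  omega

def getRelevantGroupBy_Edges (edges : List String) (povitDimEdges : List (String × Int)) : List (List String) :=
  let d := PySem.Dict.ofList povitDimEdges
  let all0 : List (List String) :=
    (PySem.List.pyRange 1 (edges.length : Int) 1).foldl (fun acc sel =>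
      (pvCombA edges sel).foldl (fun acc i => acc ++ [PySem.List.sorted i (fun x => x) false]) acc) []
  let all1 := if (0 : Int) ∈ d.values then all0 else all0 ++ [[]]
  let all2 := all1 ++ [PySem.List.sorted edges (fun x => x) false]
  d.keys.foldl (fun rel key =>
    if d.getD key 0 == 0 then
      all2.foldl (fun rel g =>
        if key ∉ g ∧ g ∈ rel then (PySem.List.remove? rel g).getD rel else rel) rel
    else rel) all2


-- ===== PORT B =====
-- Source B's choose(items, k)
def pvChooseB (items : List String) (k : Int) : List (List String) :=
  if k == 0 then [[]]
  else if (items.length : Int) < k then []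
  else match items with
    | [] => []
    | x :: rest => (pvChooseB rest (k - 1)).map (fun c => [x] ++ c) ++ pvChooseB rest k


def getRelevantGroupBy_Edges_alt (edges : List String) (povitDimEdges : List (String × Int)) : List (List String) :=
  let d := PySem.Dict.ofList povitDimEdges
  let req : PySem.Set String := PySem.Set.ofList ((d.items.filter (fun p => p.2 == 0)).map (fun p => p.1))
  let gs0 := (PySem.List.pyRange 1 (edges.length : Int) 1).flatMap
      (fun k => (pvChooseB edges k).map (fun c => PySem.List.sorted c (fun x => x) false))
  let gs1 := if req.isEmpty then gs0 ++ [[]] else gs0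
  let gs2 := gs1 ++ [PySem.List.sorted edges (fun x => x) false]
  gs2.filter (fun g => req.all (fun k => g.contains k))

-- ===== PRECONDITION & SPEC =====
def Spec_getRelevantGroupBy_Edges (edges : List String) (povitDimEdges : List (String × Int)) (out : List (List String)) : Prop := out = getRelevantGroupBy_Edges_alt edges povitDimEdges
instance (edges : List String) (povitDimEdges : List (String × Int)) (out : List (List String)) : Decidable (Spec_getRelevantGroupBy_Edges edges povitDimEdges out) := by unfold Spec_getRelevantGroupBy_Edges; infer_instance

-- ===== CLAIM (what is proved, stated in full; the proofs are below) =====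
def Claim_equal_getRelevantGroupBy_Edges : Prop := ∀ (edges : List String) (povitDimEdges : List (String × Int)), Dom_getRelevantGroupBy_Edges edges povitDimEdges → Spec_getRelevantGroupBy_Edges edges povitDimEdges (getRelevantGroupBy_Edges edges povitDimEdges)

-- ===== LEMMAS AND PROOFS =====

theorem pvCombA_eq (items : List String) (n : Int) :
    pvCombA items n = (PySem.List.pyRange 0 (items.length : Int) 1).flatMap (fun i =>
      let v := PySem.List.slice items (some i) (some (i + 1))
      if n == 1 then [v]
      else (pvCombA (PySem.List.slice items (some (i + 1)) none) (n - 1)).map (fun c => v ++ c)) := by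
  rw [pvCombA]
  simp only [List.flatMap_subtype, List.unattach_attach]

theorem pvCombA_nil (n : Int) : pvCombA [] n = [] := by
  rw [pvCombA_eq]
  simp [PySem.List.pyRange_one_eq_nil]

theorem pvCombA_cons (x : String) (xs : List String) (n : Int) :
    pvCombA (x :: xs) n =
      (if n == 1 then [[x]] else (pvCombA xs (n - 1)).map (fun c => [x] ++ c)) ++ pvCombA xs n := by
  rw [pvCombA_eq]
  have hlen : ((x :: xs).length : Int) = (xs.length : Int) + 1 := by
    simp [List.length_cons]
  rw [hlen, PySem.List.pyRange_one_cons (by omega), List.flatMap_cons]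
  congr 1
  · -- head term i = 0
    have h1 : PySem.List.slice (x :: xs) (some 0) (some (0 + 1)) = [x] := by
      rw [show ((0:Int) = ((0:Nat):Int)) from rfl]
      rw [show ((0:Nat):Int) + 1 = ((1:Nat):Int) from by norm_num]
      rw [PySem.List.slice_natCast]
      simp
    have h2 : PySem.List.slice (x :: xs) (some (0 + 1)) none = xs := by
      rw [show ((0:Int) + 1 = ((1:Nat):Int)) from by norm_num]
      rw [PySem.List.slice_from_natCast]
      simp
    simp only [h1, h2]
  · -- tail: range from 1
    rw [show (0:Int) + 1 = 1 from by ring]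
    rw [PySem.List.pyRange_one 1 ((xs.length : Int) + 1), pvCombA_eq xs n,
        PySem.List.pyRange_one 0 (xs.length : Int)]
    have ht : (((xs.length : Int) + 1) - 1).toNat = xs.length := by omega
    have ht2 : ((xs.length : Int) - 0).toNat = xs.length := by omega
    rw [ht, ht2, List.flatMap_map, List.flatMap_map]
    apply List.flatMap_congr
    intro k _
    have t1 : ((1:Int)+(k:Int)).toNat = k+1 := by omega
    have t2 : ((1:Int)+(k:Int)+1).toNat = k+2 := by omega
    have t3 : ((k:Int)).toNat = k := by omega
    have t4 : ((k:Int)+1).toNat = k+1 := by omega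
    have t5 : k+2-(k+1) = 1 := by omega
    have t6 : k+1-k = 1 := by omega
    have hA : PySem.List.slice (x::xs) (some (1+(k:Int))) (some (1+(k:Int)+1))
        = PySem.List.slice xs (some (k:Int)) (some ((k:Int)+1)) := by
      rw [PySem.List.slice_toNat _ (by omega) (by omega),
          PySem.List.slice_toNat _ (by omega) (by omega), t1, t2, t3, t4, t5, t6,
          List.drop_succ_cons]
    have hB : PySem.List.slice (x::xs) (some (1+(k:Int)+1)) none
        = PySem.List.slice xs (some ((k:Int)+1)) none := by
      have u1 : PySem.List.slice (x::xs) (some (1+(k:Int)+1)) none = (x::xs).drop ((1:Int)+(k:Int)+1).toNat :=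
        PySem.List.slice_from _ (by omega)
      have u2 : PySem.List.slice xs (some ((k:Int)+1)) none = xs.drop ((k:Int)+1).toNat :=
        PySem.List.slice_from _ (by omega)
      rw [u1, u2, t2, t4, List.drop_succ_cons]
    simp only [zero_add, hA, hB]

theorem pvChooseB_eq_nil (items : List String) (k : Int) (hk : k ≠ 0)
    (hlt : (items.length : Int) < k) : pvChooseB items k = [] := by
  cases items with
  | nil => rw [pvChooseB]; simp [hk]
  | cons x rest => rw [pvChooseB]; simp only [beq_iff_eq, hk, if_false, hlt, if_true]

theorem comb_eq_choose (items : List String) (n : Int) (hn : 1 ≤ n) :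
    pvCombA items n = pvChooseB items n := by
  induction items generalizing n with
  | nil =>
    rw [pvCombA_nil, pvChooseB]
    simp only [List.length_nil, Nat.cast_zero, beq_iff_eq]
    rw [if_neg (by omega), if_pos (by omega)]
  | cons x xs ih =>
    rw [pvCombA_cons, pvChooseB]
    have hne : (n == 0) = false := by simp; omega
    simp only [hne, Bool.false_eq_true, if_false, List.length_cons]
    push_cast
    by_cases h1 : n = 1
    · subst h1
      have h0 : pvChooseB xs 0 = [[]] := by unfold pvChooseB; simp
      rw [ih 1 le_rfl, if_neg (show ¬((xs.length:Int) + 1 < 1) by omega)]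
      simp [h0]
    · have hb : (n == 1) = false := by simp [h1]
      simp only [hb, Bool.false_eq_true, if_false]
      rw [ih (n-1) (by omega), ih n hn]
      by_cases hlt : (xs.length:Int) + 1 < n
      · rw [if_pos hlt, pvChooseB_eq_nil xs (n-1) (by omega) (by omega),
            pvChooseB_eq_nil xs n (by omega) (by omega)]
        simp
      · rw [if_neg hlt]

theorem pv_remove?_append (pre l : List (List String)) (g : List String) (hg : g ∉ pre) :
    PySem.List.remove? (pre ++ l) g = (PySem.List.remove? l g).map (pre ++ ·) := by
  induction pre with
  | nil => simp
  | cons p ps ih =>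
    have hne : p ≠ g := by intro h; exact hg (h ▸ List.mem_cons_self)
    have hg' : g ∉ ps := fun h => hg (List.mem_cons_of_mem _ h)
    rw [List.cons_append, PySem.List.remove?_cons_of_ne _ hne, ih hg', Option.map_map]
    rfl

theorem pv_inner_filter (key : String) (xs pre : List (List String)) (p : List String → Bool)
    (hpre : ∀ g ∈ pre, p g = true ∧ key ∈ g) :
    xs.foldl (fun rel g => if key ∉ g ∧ g ∈ rel then (PySem.List.remove? rel g).getD rel else rel)
        (pre ++ xs.filter p)
      = pre ++ xs.filter (fun g => p g && decide (key ∈ g)) := by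
  induction xs generalizing pre with
  | nil => simp
  | cons g rest ih =>
    rw [List.foldl_cons]
    by_cases hp : p g = true
    · by_cases hk : key ∈ g
      · rw [List.filter_cons_of_pos hp, if_neg (by simp [hk])]
        have : pre ++ g :: rest.filter p = (pre ++ [g]) ++ rest.filter p := by simp
        rw [this, ih (pre ++ [g]) (by
          intro h hmem
          rcases List.mem_append.mp hmem with h1 | h2
          · exact hpre h h1
          · simp at h2; subst h2; exact ⟨hp, hk⟩)]
        rw [List.filter_cons_of_pos (by simp [hp, hk])]
        simp
      · have hgpre : g ∉ pre := fun h => hk (hpre g h).2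
        rw [List.filter_cons_of_pos hp,
            if_pos ⟨hk, by simp⟩,
            pv_remove?_append pre _ g hgpre, PySem.List.remove?_cons_self]
        rw [show ((some (rest.filter p)).map (pre ++ ·)).getD _ = pre ++ rest.filter p from rfl]
        rw [ih pre hpre, List.filter_cons_of_neg (by simp [hk])]
    · have hgrel : g ∉ pre ++ (g :: rest).filter p := by
        intro hmem
        rcases List.mem_append.mp hmem with h1 | h2
        · exact hp (hpre g h1).1
        · exact hp (List.of_mem_filter h2)
      rw [List.filter_cons_of_neg (by simpa using hp)] at hgrel ⊢
      rw [if_neg (by intro h; exact hgrel h.2), ih pre hpre,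
          List.filter_cons_of_neg (by simp [hp])]

theorem pv_outer_gen (ks : List String) (z : String → Bool) (all : List (List String))
    (p : List String → Bool) :
    ks.foldl (fun rel key => if z key = true then
        all.foldl (fun rel g =>
          if key ∉ g ∧ g ∈ rel then (PySem.List.remove? rel g).getD rel else rel) rel
      else rel) (all.filter p)
    = all.filter (fun g => p g && (ks.filter z).all (fun k => decide (k ∈ g))) := by
  induction ks generalizing p with
  | nil => simp
  | cons key ks ih =>
    rw [List.foldl_cons]
    by_cases hz : z key = true
    · rw [if_pos hz]
      have h1 := pv_inner_filter key all [] p (by simp)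
      simp only [List.nil_append] at h1
      rw [h1, ih (fun g => p g && decide (key ∈ g)), List.filter_cons_of_pos hz]
      apply List.filter_congr
      intro g _
      simp [Bool.and_assoc]
    · rw [if_neg hz, ih p, List.filter_cons_of_neg hz]

theorem pv_mem_req (d : PySem.Dict String Int) (hnd : d.keys.Nodup) (k : String) :
    k ∈ PySem.Set.ofList ((d.items.filter (fun pr => pr.2 == 0)).map (fun pr => pr.1))
      ↔ k ∈ d.keys ∧ d.getD k 0 = 0 := by
  rw [PySem.Set.mem_ofList]
  simp only [List.mem_map, List.mem_filter, beq_iff_eq]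
  constructor
  · rintro ⟨⟨k', v⟩, ⟨hin, hv⟩, rfl⟩
    simp only at hv
    subst hv
    exact ⟨PySem.Dict.mem_keys_of_mem_items d hin,
           PySem.Dict.getD_of_mem_items d hin hnd 0⟩
  · rintro ⟨hk, hd⟩
    obtain ⟨v, hv⟩ : ∃ v, d.get? k = some v := by
      cases h : d.get? k with
      | none => exact False.elim (((PySem.Dict.get?_eq_none_iff_not_mem_keys d k).mp h) hk)
      | some v => exact ⟨v, rfl⟩
    have hit := PySem.Dict.mem_items_of_get?_eq_some d hv
    have hg : d.getD k 0 = v := PySem.Dict.getD_of_mem_items d hit hnd 0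
    exact ⟨(k, v), ⟨hit, by omega⟩, rfl⟩

theorem pv_req_nil_iff (d : PySem.Dict String Int) :
    (PySem.Set.ofList ((d.items.filter (fun pr => pr.2 == 0)).map (fun pr => pr.1)) = [])
      ↔ (0:Int) ∉ d.values := by
  rw [List.eq_nil_iff_forall_not_mem]
  simp only [PySem.Set.mem_ofList, List.mem_map, List.mem_filter, beq_iff_eq]
  have hv : d.values = d.items.map (fun pr => pr.2) := rfl
  rw [hv]; simp only [List.mem_map]
  constructor
  · rintro h ⟨pr, hin, h0⟩
    exact h pr.1 ⟨pr, ⟨hin, h0⟩, rfl⟩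
  · rintro h x ⟨pr, ⟨hin, h0⟩, rfl⟩
    exact h ⟨pr, hin, h0⟩

theorem pv_main (edges : List String) (povitDimEdges : List (String × Int)) :
    getRelevantGroupBy_Edges edges povitDimEdges = getRelevantGroupBy_Edges_alt edges povitDimEdges := by
  unfold getRelevantGroupBy_Edges getRelevantGroupBy_Edges_alt
  simp only []
  set d := PySem.Dict.ofList povitDimEdges with hd
  set req := PySem.Set.ofList ((d.items.filter (fun p => p.2 == 0)).map (fun p => p.1)) with hreq
  set srt := fun i => PySem.List.sorted i (fun x : String => x) false with hsrt
  -- step 1: the generation loops build the same list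
  have hgen : (PySem.List.pyRange 1 (edges.length : Int) 1).foldl (fun acc sel =>
        (pvCombA edges sel).foldl (fun acc i => acc ++ [srt i]) acc) []
      = (PySem.List.pyRange 1 (edges.length : Int) 1).flatMap
        (fun k => (pvChooseB edges k).map srt) := by
    have h1 : ∀ (acc : List (List String)) sel, (pvCombA edges sel).foldl
        (fun acc i => acc ++ [srt i]) acc = acc ++ (pvCombA edges sel).map srt :=
      fun acc sel => PySem.List.foldl_append_singleton_eq_map _ _ _
    simp only [h1]
    rw [PySem.List.foldl_append_eq_flatMap, List.nil_append]
    apply List.flatMap_congr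
    intro sel hsel
    rw [comb_eq_choose edges sel (PySem.List.mem_pyRange_one.mp hsel).1]
  rw [hgen]
  -- step 2: the empty-list branch conditions agree
  have hif : (if (0:Int) ∈ d.values then
        (PySem.List.pyRange 1 (edges.length : Int) 1).flatMap (fun k => (pvChooseB edges k).map srt)
      else (PySem.List.pyRange 1 (edges.length : Int) 1).flatMap (fun k => (pvChooseB edges k).map srt) ++ [[]])
      = (if req.isEmpty then
        (PySem.List.pyRange 1 (edges.length : Int) 1).flatMap (fun k => (pvChooseB edges k).map srt) ++ [[]]
      else (PySem.List.pyRange 1 (edges.length : Int) 1).flatMap (fun k => (pvChooseB edges k).map srt)) := by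
    by_cases h0 : (0:Int) ∈ d.values
    · rw [if_pos h0, if_neg ?_]
      simp only [List.isEmpty_iff, hreq, pv_req_nil_iff d]
      simpa using h0
    · rw [if_neg h0, if_pos ?_]
      simp only [List.isEmpty_iff, hreq, pv_req_nil_iff d]
      exact h0
  rw [hif]
  -- step 3: the removal loops are one filter
  set all2 := (if req.isEmpty then
        (PySem.List.pyRange 1 (edges.length : Int) 1).flatMap (fun k => (pvChooseB edges k).map srt) ++ [[]]
      else (PySem.List.pyRange 1 (edges.length : Int) 1).flatMap (fun k => (pvChooseB edges k).map srt))
      ++ [srt edges] with hall2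
  have hmain := pv_outer_gen d.keys (fun key => d.getD key 0 == 0) all2 (fun _ => true)
  simp only [List.filter_true] at hmain
  rw [hmain]
  apply List.filter_congr
  intro g _
  simp only [Bool.true_and]
  rw [Bool.eq_iff_iff]
  simp only [List.all_eq_true, List.mem_filter, decide_eq_true_eq, beq_iff_eq,
    List.contains_iff_mem]
  constructor
  · intro h k hk
    have := (pv_mem_req d (by rw [hd]; exact PySem.Dict.nodup_keys_ofList _) k).mp (by rwa [hreq] at hk)
    exact h k ⟨this.1, by simpa using this.2⟩
  · intro h k hk
    have hm : k ∈ req := by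
      rw [hreq]
      exact (pv_mem_req d (by rw [hd]; exact PySem.Dict.nodup_keys_ofList _) k).mpr ⟨hk.1, by simpa using hk.2⟩
    exact h k hm

-- ===== VERDICT (by name: the statement is the Claim_ definition above) =====
theorem getRelevantGroupBy_Edges_spec : Claim_equal_getRelevantGroupBy_Edges := by
  intro edges povitDimEdges _
  unfold Spec_getRelevantGroupBy_Edges
  exact pv_main edges povitDimEdges
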